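-- pv_equiv track=rewrite | github.com/Joe-Ferrara/IntroToLfunctions | quad_Lfunctions.py | chi_Val
-- ===== SOURCE A (Python) =====
-- def chi_Val(p, d):
--     if p == 2: # the d%4 = 1
--         if d%8 == 1:
--             return 1
--         else: # d%8 = 5
--             return -1
--     else:
--         squares_mod_p = set([])
--         for i in range(p):
--             squares_mod_p.add((i*i) % p)
--         if d%p in squares_mod_p:
--             return 1
--         else:
--             return -1
-- ===== SOURCE B (Python) =====
-- def chi_Val(p, d):
--     if p == 2:
--         return 1 if d % 8 == 1 else -1
--     r = d % p
--     # Search i = 0, 1, ..., p//2 (enough, since (p-i)^2 = i^2 mod p), maintaining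
--     # s = i*i % p incrementally via (i+1)^2 = i^2 + 2i + 1 -- no set, no squaring.
--     i = 0
--     s = 0
--     while 2 * i <= p:
--         if s == r:
--             return 1
--         s = (s + 2 * i + 1) % p
--         i += 1
--     return -1
-- ===== Notes on version B (the rewrite author's own statement) =====
-- stated objective: faster
-- what changed: B replaces A's construction of the full set of squares mod p by an incremental early-exit scan: it maintains the running square s = i*i % p via s += 2i+1 for i in [0, p//2] only (using (p-i)^2 = i^2 mod p) and returns 1 at the first hit, so no set is built, only half the range is visited, and no multiplication is done in the loop.
import Mathlib
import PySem

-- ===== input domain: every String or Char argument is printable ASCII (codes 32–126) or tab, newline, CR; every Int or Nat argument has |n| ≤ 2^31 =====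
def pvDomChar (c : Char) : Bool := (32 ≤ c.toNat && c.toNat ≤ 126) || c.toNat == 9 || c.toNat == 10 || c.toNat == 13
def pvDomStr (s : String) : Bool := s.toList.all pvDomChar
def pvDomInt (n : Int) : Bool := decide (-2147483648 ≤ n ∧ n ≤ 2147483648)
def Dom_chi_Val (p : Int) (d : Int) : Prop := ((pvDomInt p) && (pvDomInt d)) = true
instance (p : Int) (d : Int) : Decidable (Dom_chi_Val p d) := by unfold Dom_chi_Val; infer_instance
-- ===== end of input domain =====

-- B drops A's squares set: it scans i = 0..p//2 with an incrementally maintained running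
-- square s = i*i % p (s += 2i+1) and exits at the first hit; objective: faster (constant factor).


-- ===== PORT A =====
-- Python's 'set' is modelled by Std.HashSet (only membership is observed, so hash order never matters).
def chi_Val (p : Int) (d : Int) : Int :=
  if p == 2 then
    if PySem.Int.mod d 8 == 1 then 1 else -1
  else
    let squares_mod_p : Std.HashSet Int :=
      (PySem.List.pyRange 0 p 1).foldl
        (fun s i => s.insert (PySem.Int.mod (i * i) p)) ∅
    if squares_mod_p.contains (PySem.Int.mod d p) then 1 else -1

-- ===== PORT B =====
-- the while loop of Source B: state (i, s) with s the running square i*i % p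
def chiLoop (p r : Int) (i s : Int) : Int :=
  if h : 2 * i ≤ p then
    if s == r then 1
    else chiLoop p r (i + 1) (PySem.Int.mod (s + 2 * i + 1) p)
  else -1
termination_by (p + 1 - 2 * i).toNat
decreasing_by omega

def chi_Val_alt (p : Int) (d : Int) : Int :=
  if p == 2 then
    if PySem.Int.mod d 8 == 1 then 1 else -1
  else
    chiLoop p (PySem.Int.mod d p) 0 0

-- ===== PRECONDITION & SPEC =====
-- Python A raises ZeroDivisionError at d % p when p = 0 (B does too); p ≠ 0 is the only exclusion.
def Pre_chi_Val (p : Int) (_d : Int) : Prop := p ≠ 0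
instance (p : Int) (d : Int) : Decidable (Pre_chi_Val p d) := by unfold Pre_chi_Val; infer_instance
def pvWitness_chi_Val : Int × Int := (7, 3)

def Spec_chi_Val (p : Int) (d : Int) (out : Int) : Prop := out = chi_Val_alt p d
instance (p : Int) (d : Int) (out : Int) : Decidable (Spec_chi_Val p d out) := by unfold Spec_chi_Val; infer_instance

-- ===== CLAIM (what is proved, stated in full; the proofs are below) =====
def Claim_equal_chi_Val : Prop := ∀ (p : Int) (d : Int), Dom_chi_Val p d → Pre_chi_Val p d → Spec_chi_Val p d (chi_Val p d)

-- ===== LEMMAS AND PROOFS =====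

-- membership after folding inserts of f over a list into a HashSet
lemma contains_foldl_insert (l : List Int) (f : Int → Int) (s : Std.HashSet Int) (x : Int) :
    ((l.foldl (fun s i => s.insert (f i)) s).contains x) = (s.contains x || l.any (fun i => f i == x)) := by
  induction l generalizing s with
  | nil => simp
  | cons a t ih =>
    simp only [List.foldl_cons, ih, Std.HashSet.contains_insert, List.any_cons]
    cases (f a == x) <;> simp

-- chiLoop, started with the running-square invariant s = i*i % p, returns 1 exactly when some
-- j with i ≤ j ≤ p/2 has j*j % p = r, and returns -1 otherwise (strong induction on p+1-2i)
lemma chiLoop_char (p r : Int) (hp : 0 < p) :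
    ∀ n : Nat, ∀ i s, (p + 1 - 2 * i).toNat ≤ n → 0 ≤ i → s = i * i % p →
      ((chiLoop p r i s = 1 ↔ ∃ j, i ≤ j ∧ 2 * j ≤ p ∧ j * j % p = r) ∧
       (chiLoop p r i s = 1 ∨ chiLoop p r i s = -1)) := by
  intro n
  induction n with
  | zero =>
    intro i s hn hi hs
    rw [chiLoop.eq_def, dif_neg (by omega)]
    refine ⟨⟨by omega, ?_⟩, Or.inr rfl⟩
    rintro ⟨j, h1, h2, _⟩; omega
  | succ n ih =>
    intro i s hn hi hs
    by_cases hle : 2 * i ≤ p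
    · by_cases heq : s = r
      · rw [chiLoop.eq_def, dif_pos hle, if_pos (by simp [heq])]
        exact ⟨⟨fun _ => ⟨i, le_refl i, hle, by rw [← hs, heq]⟩, fun _ => rfl⟩, Or.inl rfl⟩
      · rw [chiLoop.eq_def, dif_pos hle, if_neg (by simp [heq])]
        have hs' : PySem.Int.mod (s + 2 * i + 1) p = ((i + 1) * (i + 1)) % p := by
          rw [PySem.Int.mod_eq_emod_of_pos hp, hs,
              show i * i % p + 2 * i + 1 = i * i % p + (2 * i + 1) from by ring,
              Int.emod_add_emod,
              show i * i + (2 * i + 1) = (i + 1) * (i + 1) from by ring]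
        obtain ⟨ih1, ih2⟩ := ih (i + 1) _ (by omega) (by omega) hs'
        refine ⟨?_, ih2⟩
        rw [ih1]
        have hnot : ¬ (i * i % p = r) := fun hx => heq (hs.trans hx)
        constructor
        · rintro ⟨j, h1, h2, h3⟩; exact ⟨j, by omega, h2, h3⟩
        · rintro ⟨j, h1, h2, h3⟩
          rcases eq_or_lt_of_le h1 with h | h
          · exact absurd (h ▸ h3) hnot
          · exact ⟨j, by omega, h2, h3⟩
    · rw [chiLoop.eq_def, dif_neg hle]
      refine ⟨⟨by omega, ?_⟩, Or.inr rfl⟩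
      rintro ⟨j, h1, h2, _⟩; omega

-- the half range [0, p/2] sees every square that the full range [0, p) sees
lemma half_range_squares (p r : Int) (hp : 0 < p) :
    ((∃ i, i ∈ PySem.List.pyRange 0 p 1 ∧ (i * i) % p = r) ↔
     (∃ i, 0 ≤ i ∧ 2 * i ≤ p ∧ (i * i) % p = r)) := by
  constructor
  · rintro ⟨i, hi, hsq⟩
    rw [PySem.List.mem_pyRange_one] at hi
    by_cases hhalf : 2 * i ≤ p
    · exact ⟨i, by omega, hhalf, hsq⟩
    · refine ⟨p - i, by omega, by omega, ?_⟩
      have : (p - i) * (p - i) = i * i + p * (p - 2 * i) := by ring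
      rw [this, Int.add_mul_emod_self_left, hsq]
  · rintro ⟨i, h0, h2, hsq⟩
    exact ⟨i, by rw [PySem.List.mem_pyRange_one]; omega, hsq⟩

-- ===== VERDICT (by name: the statement is the Claim_ definition above) =====
theorem chi_Val_spec : Claim_equal_chi_Val := by
  intro p d _ hp
  unfold Spec_chi_Val chi_Val chi_Val_alt
  by_cases h2 : p = 2
  · simp [h2]
  · simp only [beq_iff_eq, if_neg h2]
    rcases lt_or_gt_of_ne hp with hneg | hpos
    · -- p < 0: A's range is empty, B's loop exits at once
      rw [PySem.List.pyRange_one_eq_nil (by omega), chiLoop.eq_def, dif_neg (by omega)]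
      simp [Std.HashSet.contains_empty]
    · have hmod : ∀ a : Int, PySem.Int.mod a p = a % p := fun a =>
        PySem.Int.mod_eq_emod_of_pos hpos
      have hA : (((PySem.List.pyRange 0 p 1).foldl
            (fun s i => s.insert (PySem.Int.mod (i * i) p)) (∅ : Std.HashSet Int)).contains
              (PySem.Int.mod d p)) = true
          ↔ ∃ i, i ∈ PySem.List.pyRange 0 p 1 ∧ (i * i) % p = d % p := by
        rw [contains_foldl_insert]
        simp [Std.HashSet.contains_empty, hmod]
      obtain ⟨hone, hvals⟩ := chiLoop_char p (PySem.Int.mod d p) hpos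
        (p + 1).toNat 0 0 (by omega) le_rfl (by simp)
      have hiff := half_range_squares p (d % p) hpos
      by_cases hc : ∃ i, i ∈ PySem.List.pyRange 0 p 1 ∧ (i * i) % p = d % p
      · rw [if_pos (hA.mpr hc)]
        obtain ⟨i, h0, h1, h3⟩ := hiff.mp hc
        exact (hone.mpr ⟨i, h0, h1, by rw [hmod]; exact h3⟩).symm
      · rw [if_neg (fun h => hc (hA.mp h))]
        rcases hvals with h1 | hneg1
        · exact absurd (hiff.mpr (by
            obtain ⟨j, hj0, hj1, hj2⟩ := hone.mp h1
            exact ⟨j, hj0, hj1, by rw [hmod] at hj2; exact hj2⟩)) hc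
        · exact hneg1.symm
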